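-- pv_equiv track=rewrite | github.com/paulohsilvapinto/advent-of-code | 2023/day06/task2_recursion.py | find_max_time_win
-- ===== SOURCE A (Python) =====
-- from math import floor
--
-- def calculate_distance(time_holding, time_available):
--     return time_holding * (time_available - time_holding)
--
-- def get_list_middle_index(input_list):
--     if len(input_list) % 2 == 0:
--         return floor(len(input_list) // 2)
--     else:
--         return len(input_list) // 2
--
-- def find_max_time_win(time_range, race_time, record_distance):
--     if len(time_range) == 1:
--         return time_range[0]
--     elif len(time_range) == 2:
--         if calculate_distance(time_range[1], race_time) > record_distance:
--             return time_range[1]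
--         else:
--             return time_range[0]
--
--     middle_idx = get_list_middle_index(time_range)
--     if calculate_distance(time_range[middle_idx], race_time) > record_distance:
--         return find_max_time_win(time_range[middle_idx:], race_time, record_distance)
--     else:
--         return find_max_time_win(time_range[0:middle_idx], race_time, record_distance)
-- ===== SOURCE B (Python) =====
-- def find_max_time_win(time_range, race_time, record_distance):
--     lo, hi = 0, len(time_range) - 1
--     while hi - lo >= 2:
--         mid = lo + (hi - lo + 1) // 2
--         if time_range[mid] * (race_time - time_range[mid]) > record_distance:
--             lo = mid
--         else:
--             hi = mid - 1
--     if hi > lo and time_range[hi] * (race_time - time_range[hi]) > record_distance: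
--         return time_range[hi]
--     return time_range[lo]
-- ===== Notes on version B (the rewrite author's own statement) =====
-- stated objective: alternative
-- what changed: Replaced A's recursive binary search that materialises a new list slice at every step with an iterative index-based binary search over a [lo, hi] window, so no sublists are ever copied.
import Mathlib
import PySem

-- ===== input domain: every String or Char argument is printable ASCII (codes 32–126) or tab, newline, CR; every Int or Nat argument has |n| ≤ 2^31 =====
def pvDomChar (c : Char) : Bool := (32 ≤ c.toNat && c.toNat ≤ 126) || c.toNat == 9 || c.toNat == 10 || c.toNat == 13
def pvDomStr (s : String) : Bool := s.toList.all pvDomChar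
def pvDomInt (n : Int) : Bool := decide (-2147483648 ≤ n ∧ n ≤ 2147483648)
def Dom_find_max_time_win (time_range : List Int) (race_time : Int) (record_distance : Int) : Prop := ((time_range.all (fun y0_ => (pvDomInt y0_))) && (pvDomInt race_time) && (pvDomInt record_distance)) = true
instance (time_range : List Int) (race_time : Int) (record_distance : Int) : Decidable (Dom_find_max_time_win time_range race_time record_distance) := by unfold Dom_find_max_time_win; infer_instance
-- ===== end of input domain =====

-- B replaces A's slicing recursion by an iterative index-based binary search on [lo, hi] (alternative decomposition, no list copying).

-- ===== PORT A =====
def calculate_distance (time_holding time_available : Int) : Int :=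
  time_holding * (time_available - time_holding)

def get_list_middle_index (input_list : List Int) : Int :=
  if PySem.Int.mod (input_list.length : Int) 2 == 0 then
    PySem.Int.floordiv (input_list.length : Int) 2   -- floor of an int is itself
  else
    PySem.Int.floordiv (input_list.length : Int) 2

-- fuel = recursion depth bound, only a totality guard (Python A raises IndexError on [] before recursing; inside Pre_ fuel is never exhausted)
def findA : Nat → List Int → Int → Int → Int
  | 0, _, _, _ => 0
  | Nat.succ fuel, time_range, race_time, record_distance =>
    if time_range.length == 1 then (PySem.List.pyGet? time_range 0).getD 0
    else if time_range.length == 2 then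
      if calculate_distance ((PySem.List.pyGet? time_range 1).getD 0) race_time > record_distance then
        (PySem.List.pyGet? time_range 1).getD 0
      else
        (PySem.List.pyGet? time_range 0).getD 0
    else
      let middle_idx := get_list_middle_index time_range
      if calculate_distance ((PySem.List.pyGet? time_range middle_idx).getD 0) race_time > record_distance then
        findA fuel (PySem.List.slice time_range (some middle_idx) none) race_time record_distance
      else
        findA fuel (PySem.List.slice time_range (some 0) (some middle_idx)) race_time record_distance

def find_max_time_win (time_range : List Int) (race_time : Int) (record_distance : Int) : Int :=
  findA (time_range.length + 1) time_range race_time record_distance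

-- ===== PORT B =====
-- type of the post-loop return (the two return statements after the while loop)
def bFinal (xs : List Int) (race_time record_distance lo hi : Int) : Int :=
  let w := (PySem.List.pyGet? xs hi).getD 0
  if hi > lo ∧ w * (race_time - w) > record_distance then w
  else (PySem.List.pyGet? xs lo).getD 0

-- the while loop; fuel is only a totality guard (each iteration shrinks hi - lo by ≥ 1, so fuel = len(xs) is never exhausted)
def bLoop : Nat → List Int → Int → Int → Int → Int → Int
  | 0, xs, race_time, record_distance, lo, hi => bFinal xs race_time record_distance lo hi
  | Nat.succ fuel, xs, race_time, record_distance, lo, hi =>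
    if hi - lo ≥ 2 then
      let mid := lo + PySem.Int.floordiv (hi - lo + 1) 2
      let v := (PySem.List.pyGet? xs mid).getD 0
      if v * (race_time - v) > record_distance then
        bLoop fuel xs race_time record_distance mid hi
      else
        bLoop fuel xs race_time record_distance lo (mid - 1)
    else bFinal xs race_time record_distance lo hi

def find_max_time_win_alt (time_range : List Int) (race_time : Int) (record_distance : Int) : Int :=
  bLoop time_range.length time_range race_time record_distance 0 ((time_range.length : Int) - 1)

-- ===== PRECONDITION & SPEC =====
-- Pre_ excludes only the empty list, on which Python A (and B) raise IndexError.
def Pre_find_max_time_win (time_range : List Int) (race_time : Int) (record_distance : Int) : Prop :=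
  time_range ≠ []
instance (time_range : List Int) (race_time : Int) (record_distance : Int) : Decidable (Pre_find_max_time_win time_range race_time record_distance) := by unfold Pre_find_max_time_win; infer_instance

def pvWitness_find_max_time_win : List Int × Int × Int := ([5], 7, 2)

def Spec_find_max_time_win (time_range : List Int) (race_time : Int) (record_distance : Int) (out : Int) : Prop := out = find_max_time_win_alt time_range race_time record_distance
instance (time_range : List Int) (race_time : Int) (record_distance : Int) (out : Int) : Decidable (Spec_find_max_time_win time_range race_time record_distance out) := by unfold Spec_find_max_time_win; infer_instance

-- ===== CLAIM (what is proved, stated in full; the proofs are below) =====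
def Claim_equal_find_max_time_win : Prop := ∀ (time_range : List Int) (race_time : Int) (record_distance : Int), Dom_find_max_time_win time_range race_time record_distance → Pre_find_max_time_win time_range race_time record_distance → Spec_find_max_time_win time_range race_time record_distance (find_max_time_win time_range race_time record_distance)

-- ===== LEMMAS AND PROOFS =====

lemma interval_get (xs : List Int) (lo k i : Nat) (hk : i < k) (hlen : lo + k ≤ xs.length) :
    ((xs.drop lo).take k)[i]? = some (xs[lo + i]'(by omega)) := by
  rw [List.getElem?_take_of_lt hk, List.getElem?_drop]
  exact List.getElem?_eq_getElem (by omega)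

lemma middle_idx_eq (l : List Int) : get_list_middle_index l = PySem.Int.floordiv (l.length : Int) 2 := by
  unfold get_list_middle_index; split <;> rfl

lemma bLoop_small (g : Nat) (xs : List Int) (rt rd lo hi : Int) (h : hi - lo < 2) :
    bLoop g xs rt rd lo hi = bFinal xs rt rd lo hi := by
  cases g with
  | zero => rfl
  | succ f => simp only [bLoop]; rw [if_neg (by omega)]

lemma main_lemma (xs : List Int) (rt rd : Int) :
    ∀ fuel k lo (g : Nat), 1 ≤ k → lo + k ≤ xs.length → k ≤ fuel → k ≤ g + 1 →
      findA fuel ((xs.drop lo).take k) rt rd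
        = bLoop g xs rt rd (lo : Int) ((lo : Int) + (k : Int) - 1) := by
  intro fuel
  induction fuel with
  | zero => intro k lo g hk _ hf _; omega
  | succ f ih =>
    intro k lo g hk hlen hf hg
    have hys : ((xs.drop lo).take k).length = k := by
      simp [List.length_take, List.length_drop]; omega
    by_cases hk1 : k = 1
    · subst hk1
      have h0 : ((xs.drop lo).take 1)[0]? = some (xs[lo]'(by omega)) := interval_get xs lo 1 0 (by omega) hlen
      simp only [findA, hys]
      rw [if_pos (by decide)]
      rw [bLoop_small g xs rt rd _ _ (by push_cast; omega)]
      simp only [bFinal]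
      have hhi : (lo:Int) + ((1:Nat):Int) - 1 = (lo:Int) := by push_cast; ring
      simp only [hhi]
      rw [if_neg (by simp)]
      rw [PySem.List.pyGet?_zero, h0, PySem.List.pyGet?_natCast,
          List.getElem?_eq_getElem (show lo < xs.length by omega)]
    · by_cases hk2 : k = 2
      · subst hk2
        have h0 : ((xs.drop lo).take 2)[0]? = some (xs[lo]'(by omega)) := interval_get xs lo 2 0 (by omega) hlen
        have h1 : ((xs.drop lo).take 2)[1]? = some (xs[lo+1]'(by omega)) := interval_get xs lo 2 1 (by omega) hlen
        simp only [findA, hys]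
        rw [if_neg (by decide), if_pos (by decide)]
        rw [bLoop_small g xs rt rd _ _ (by push_cast; omega)]
        simp only [bFinal]
        have hhi : (lo:Int) + ((2:Nat):Int) - 1 = ((lo + 1 : Nat) : Int) := by push_cast; ring
        simp only [hhi]
        have hgt : ((lo + 1 : Nat) : Int) > (lo : Int) := by push_cast; omega
        have g1 : PySem.List.pyGet? ((xs.drop lo).take 2) 1 = some (xs[lo+1]'(by omega)) := by
          rw [PySem.List.pyGet?_of_nonneg ((xs.drop lo).take 2) (by omega : (0:Int) ≤ 1)]
          simpa using h1
        have g0 : PySem.List.pyGet? ((xs.drop lo).take 2) 0 = some (xs[lo]'(by omega)) := by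
          rw [PySem.List.pyGet?_zero]; exact h0
        rw [g1, g0, PySem.List.pyGet?_natCast, PySem.List.pyGet?_natCast,
            List.getElem?_eq_getElem (show lo + 1 < xs.length by omega),
            List.getElem?_eq_getElem (show lo < xs.length by omega)]
        simp only [Option.getD_some, calculate_distance]
        by_cases hwin : xs[lo+1]'(by omega) * (rt - xs[lo+1]'(by omega)) > rd
        · rw [if_pos hwin, if_pos ⟨hgt, hwin⟩]
        · rw [if_neg hwin, if_neg (by intro h; exact hwin h.2)]
      · -- k ≥ 3
        have hk3 : 3 ≤ k := by omega
        have hm2 : get_list_middle_index ((xs.drop lo).take k) = ((k/2 : Nat) : Int) := by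
          rw [middle_idx_eq, hys]; exact_mod_cast PySem.Int.floordiv_natCast k 2
        have hmidget : ((xs.drop lo).take k)[k/2]? = some (xs[lo + k/2]'(by omega)) :=
          interval_get xs lo k (k/2) (by omega) hlen
        have hmid : (lo:Int) + PySem.Int.floordiv ((lo:Int) + k - 1 - lo + 1) 2 = ((lo + k/2 : Nat) : Int) := by
          have : (lo:Int) + k - 1 - lo + 1 = (k:Int) := by ring
          rw [this]
          have h2 : PySem.Int.floordiv (k:Int) 2 = ((k/2 : Nat) : Int) := by
            exact_mod_cast PySem.Int.floordiv_natCast k 2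
          rw [h2]; push_cast; ring
        have hBget : PySem.List.pyGet? xs ((lo + k/2 : Nat) : Int) = some (xs[lo + k/2]'(by omega)) := by
          rw [PySem.List.pyGet?_natCast]
          exact List.getElem?_eq_getElem (by omega)
        simp only [findA, hys]
        rw [if_neg (by simpa using hk1), if_neg (by simpa using hk2)]
        obtain ⟨g', rfl⟩ : ∃ g', g = g' + 1 := ⟨g - 1, by omega⟩
        simp only [bLoop]
        rw [if_pos (by omega : (lo:Int) + k - 1 - lo ≥ 2)]
        simp only [hm2, hmid, hBget, PySem.List.pyGet?_natCast, hmidget, Option.getD_some,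
          calculate_distance]
        by_cases hwin : xs[lo + k/2]'(by omega) * (rt - xs[lo + k/2]'(by omega)) > rd
        · rw [if_pos hwin, if_pos hwin]
          have hslice : PySem.List.slice ((xs.drop lo).take k) (some ((k/2 : Nat) : Int)) none
              = (xs.drop (lo + k/2)).take (k - k/2) := by
            rw [PySem.List.slice_from_natCast, List.drop_take, List.drop_drop]
          rw [hslice, ih (k - k/2) (lo + k/2) g' (by omega) (by omega) (by omega) (by omega)]
          congr 1 <;> (try push_cast) <;> omega
        · rw [if_neg hwin, if_neg hwin]
          have hslice : PySem.List.slice ((xs.drop lo).take k) (some 0) (some ((k/2 : Nat) : Int))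
              = (xs.drop lo).take (k/2) := by
            rw [PySem.List.slice_zero_start, PySem.List.slice_to_natCast, List.take_take]
            congr 1
            omega
          rw [hslice, ih (k/2) lo g' (by omega) (by omega) (by omega) (by omega)]
          congr 1

theorem find_max_time_win_spec : Claim_equal_find_max_time_win := by
  intro xs rt rd _ hpre
  have hk : 1 ≤ xs.length := by
    cases xs with
    | nil => exact absurd rfl hpre
    | cons a t => simp
  have h := main_lemma xs rt rd (xs.length + 1) xs.length 0 xs.length hk (by omega) (by omega) (by omega)
  simp only [List.drop_zero, List.take_length] at h
  unfold Spec_find_max_time_win find_max_time_win find_max_time_win_alt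
  rw [h]
  congr 1
  push_cast
  ring
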